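-- pv_equiv track=rewrite | github.com/marclevin/Comparator | tests/resources/multi_func_steps/multi_func0.py | reverseConst
-- ===== SOURCE A (Python) =====
-- vowel = ('aeiou')
--
-- def reverseConst(word):
--     b = True
--     while b:
--         first = word[:len(word) - 1]
--         last = word[len(word) - 1:len(word)]
--         if not (last in vowel):
--             word = last + first
--         else:
--             b = False
--     return word
-- ===== SOURCE B (Python) =====
-- def reverseConst(word):
--     # Single backward scan for the last vowel, then one slice rotation.
--     for i in range(len(word) - 1, -1, -1):
--         if word[i] in 'aeiou':
--             return word[i + 1:] + word[:i + 1]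
--     return word
-- ===== Notes on version B (the rewrite author's own statement) =====
-- stated objective: alternative
-- what changed: A rotates the last character to the front one step at a time until the last character is a vowel; B scans backward once for the last vowel and performs a single slice rotation.
-- outside the precondition, e.g. on reverseConst('xyz'): A does not finish within the time limit, B returns 'xyz'
import Mathlib
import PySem

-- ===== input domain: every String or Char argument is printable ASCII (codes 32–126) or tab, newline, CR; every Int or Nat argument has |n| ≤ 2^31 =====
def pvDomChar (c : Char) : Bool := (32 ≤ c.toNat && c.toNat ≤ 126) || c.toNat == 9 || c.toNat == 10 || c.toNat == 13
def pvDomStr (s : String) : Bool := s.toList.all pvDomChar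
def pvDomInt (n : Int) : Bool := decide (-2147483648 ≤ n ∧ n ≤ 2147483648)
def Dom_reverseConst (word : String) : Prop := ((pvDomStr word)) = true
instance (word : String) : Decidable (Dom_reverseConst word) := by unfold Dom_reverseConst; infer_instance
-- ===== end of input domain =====

-- B replaces A's one-char-at-a-time rotation loop by a single backward scan for the last
-- vowel followed by one slice rotation (objective: alternative single-pass algorithm).

-- ===== PORT A =====
-- vowel = ('aeiou')
def pvVowels : List Char := ['a', 'e', 'i', 'o', 'u']

-- the while loop of A; one fuel unit per iteration (the loop terminates only on inputs
-- satisfying Pre_reverseConst; length+1 fuel is proved sufficient there)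
def reverseConstLoop : Nat → List Char → List Char
  | 0, w => w
  | f + 1, w =>
      let first := PySem.List.slice w (some 0) (some ((w.length : Int) - 1))
      let last := PySem.List.slice w (some ((w.length : Int) - 1)) (some (w.length : Int))
      if !(PySem.Chars.isIn last pvVowels) then
        reverseConstLoop f (last ++ first)
      else
        w

def reverseConst (word : String) : String :=
  String.ofList (reverseConstLoop (word.toList.length + 1) word.toList)

-- ===== PORT B =====
-- for i in range(len(word)-1, -1, -1): ...   — i runs k-1, k-2, …, 0 where k is the fuel
def reverseConstAltGo (w : List Char) : Nat → List Char
  | 0 => w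
  | k + 1 =>
      if pvVowels.contains (PySem.List.pyGetD w (k : Int) ' ') then
        PySem.List.slice w (some ((k : Int) + 1)) none ++
          PySem.List.slice w none (some ((k : Int) + 1))
      else
        reverseConstAltGo w k

def reverseConst_alt (word : String) : String :=
  String.ofList (reverseConstAltGo word.toList word.toList.length)

-- ===== PRECONDITION & SPEC =====
-- Pre_ excludes exactly the inputs on which A never returns: a nonempty word containing
-- no lowercase vowel makes A's while loop rotate forever.
def Pre_reverseConst (word : String) : Prop :=
  word.toList = [] ∨ word.toList.any (fun c => pvVowels.contains c) = true
instance (word : String) : Decidable (Pre_reverseConst word) := by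
  unfold Pre_reverseConst; infer_instance

def pvWitness_reverseConst : String := "ba"

def Spec_reverseConst (word : String) (out : String) : Prop := out = reverseConst_alt word
instance (word : String) (out : String) : Decidable (Spec_reverseConst word out) := by
  unfold Spec_reverseConst; infer_instance

-- ===== CLAIM (what is proved, stated in full; the proofs are below) =====
def Claim_equal_reverseConst : Prop :=
  ∀ (word : String), Dom_reverseConst word → Pre_reverseConst word →
    Spec_reverseConst word (reverseConst word)

-- ===== LEMMAS AND PROOFS =====

-- One step of A's loop on a nonempty word u ++ [c]: first = u, last = [c].
theorem loop_step (u : List Char) (c : Char) (f : Nat) :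
    reverseConstLoop (f + 1) (u ++ [c]) =
      if !(PySem.Chars.isIn [c] pvVowels) then reverseConstLoop f (c :: u)
      else u ++ [c] := by
  have hlen : ((u ++ [c]).length : Int) = (u.length : Int) + 1 := by
    simp
  show (if !(PySem.Chars.isIn
        (PySem.List.slice (u ++ [c]) (some (((u ++ [c]).length : Int) - 1))
          (some ((u ++ [c]).length : Int))) pvVowels) then
      reverseConstLoop f
        ((PySem.List.slice (u ++ [c]) (some (((u ++ [c]).length : Int) - 1))
            (some ((u ++ [c]).length : Int))) ++
          (PySem.List.slice (u ++ [c]) (some 0) (some (((u ++ [c]).length : Int) - 1))))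
    else u ++ [c]) = _
  rw [hlen]
  have h1 : ((u.length : Int) + 1) - 1 = ((u.length : Nat) : Int) := by omega
  have h2 : (u.length : Int) + 1 = (((u.length + 1 : Nat)) : Int) := by omega
  rw [h1, h2]
  rw [PySem.List.slice_natCast, PySem.List.slice_zero_start, PySem.List.slice_to_natCast]
  simp

-- A's loop skips a vowel-free suffix by rotating it, char by char, to the front.
theorem loop_skip (s : List Char) (hs : ∀ c ∈ s, c ∉ pvVowels) :
    ∀ (p : List Char) (f : Nat),
      reverseConstLoop (s.length + f) (p ++ s) = reverseConstLoop f (s ++ p) := by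
  induction s using List.reverseRecOn with
  | nil => intro p f; simp
  | append_singleton s' c ih =>
      intro p f
      have hc : c ∉ pvVowels := hs c (by simp)
      have hnot : PySem.Chars.isIn [c] pvVowels = false := by
        rw [PySem.Chars.isIn_eq_false_iff, List.singleton_infix_iff]
        exact hc
      have hlen : (s' ++ [c]).length + f = (s'.length + f) + 1 := by simp; omega
      rw [hlen, ← List.append_assoc, loop_step, hnot]
      simp only [Bool.not_false, if_pos]
      have := ih (fun x hx => hs x (by simp [hx])) (c :: p) f
      rw [show c :: (p ++ s') = (c :: p) ++ s' by simp] at *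
      rw [this]
      simp

-- A's loop stops at once when the last char is a vowel.
theorem loop_stop (u : List Char) (c : Char) (f : Nat) (hc : c ∈ pvVowels) :
    reverseConstLoop (f + 1) (u ++ [c]) = u ++ [c] := by
  rw [loop_step]
  have : PySem.Chars.isIn [c] pvVowels = true := by
    rw [PySem.Chars.isIn_iff_infix, List.singleton_infix_iff]; exact hc
  simp [this]

-- B's scan skips indices above i that carry no vowel.
theorem alt_skip (w : List Char) (i d : Nat) (hle : i + 1 + d ≤ w.length)
    (hafter : ∀ j, i < j → (hj : j < w.length) → w[j] ∉ pvVowels) :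
    reverseConstAltGo w (i + 1 + d) = reverseConstAltGo w (i + 1) := by
  induction d with
  | zero => rfl
  | succ d ih =>
      have hk : i + 1 + d < w.length := by omega
      have hget : PySem.List.pyGetD w ((i + 1 + d : Nat) : Int) ' ' = w[i + 1 + d] := by
        rw [PySem.List.pyGetD_natCast]
        exact List.getD_eq_getElem w ' ' hk
      have hnv : w[i + 1 + d] ∉ pvVowels := hafter _ (by omega) hk
      show (if pvVowels.contains (PySem.List.pyGetD w ((i + 1 + d : Nat) : Int) ' ')
            then _ else reverseConstAltGo w (i + 1 + d)) = _
      rw [hget]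
      rw [if_neg (by simpa using hnv)]
      exact ih (by omega)

-- B's scan stops at index i when w[i] is a vowel.
theorem alt_stop (w : List Char) (i : Nat) (hi : i < w.length)
    (hv : w[i] ∈ pvVowels) :
    reverseConstAltGo w (i + 1) = w.drop (i + 1) ++ w.take (i + 1) := by
  have hget : PySem.List.pyGetD w ((i : Nat) : Int) ' ' = w[i] := by
    rw [PySem.List.pyGetD_natCast]
    exact List.getD_eq_getElem w ' ' hi
  show (if pvVowels.contains (PySem.List.pyGetD w ((i : Nat) : Int) ' ')
        then PySem.List.slice w (some ((i : Int) + 1)) none ++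
          PySem.List.slice w none (some ((i : Int) + 1)) else _) = _
  rw [hget, if_pos (by simpa using hv)]
  have h2 : ((i : Int) + 1) = (((i + 1 : Nat)) : Int) := by omega
  rw [h2, PySem.List.slice_from_natCast, PySem.List.slice_to_natCast]

-- the last index carrying a vowel exists whenever some vowel is present
theorem exists_last_vowel (w : List Char) (h : ∃ c ∈ w, c ∈ pvVowels) :
    ∃ i, ∃ (hi : i < w.length), w[i] ∈ pvVowels ∧
      ∀ j, i < j → (hj : j < w.length) → w[j] ∉ pvVowels := by
  induction w using List.reverseRecOn with
  | nil => simp at h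
  | append_singleton u c ih =>
      by_cases hc : c ∈ pvVowels
      · refine ⟨u.length, by simp, ?_, ?_⟩
        · simpa using hc
        · intro j hj1 hj2; simp at hj2; omega
      · obtain ⟨x, hx, hxv⟩ := h
        rcases List.mem_append.mp hx with hxu | hxc
        · obtain ⟨i, hi, hiv, hafter⟩ := ih ⟨x, hxu, hxv⟩
          refine ⟨i, by simp; omega, ?_, ?_⟩
          · rwa [List.getElem_append_left hi]
          · intro j hj1 hj2
            simp at hj2
            by_cases hju : j < u.length
            · rw [List.getElem_append_left hju]; exact hafter j hj1 hju
            · have : j = u.length := by omega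
              subst this
              simpa using hc
        · simp at hxc; subst hxc; exact absurd hxv hc

-- both programs rotate the last vowel (index i) to the back
theorem both_eq (w : List Char) (i : Nat) (hi : i < w.length)
    (hv : w[i] ∈ pvVowels)
    (hafter : ∀ j, i < j → (hj : j < w.length) → w[j] ∉ pvVowels) :
    reverseConstLoop (w.length + 1) w = w.drop (i + 1) ++ w.take (i + 1) := by
  set t := w.take (i + 1) with ht
  set s := w.drop (i + 1) with hs
  have hw : w = t ++ s := (List.take_append_drop (i + 1) w).symm
  have hslen : s.length = w.length - (i + 1) := by simp [hs]
  have htlen : t.length = i + 1 := by simp [ht]; omega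
  have hsnv : ∀ c ∈ s, c ∉ pvVowels := by
    intro c hc
    obtain ⟨k, hk, hck⟩ := List.getElem_of_mem hc
    have hk' : i + 1 + k < w.length := by omega
    have : s[k] = w[i + 1 + k] := by
      simp [hs, List.getElem_drop]
    rw [← hck, this]
    exact hafter _ (by omega) hk'
  -- t = u ++ [w[i]] with w[i] a vowel
  have htne : t ≠ [] := by intro h; rw [h] at htlen; simp at htlen
  obtain ⟨u, c, huc⟩ : ∃ u c, t = u ++ [c] := by
    rcases List.eq_nil_or_concat t with h | ⟨u, c, h⟩
    · exact absurd h htne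
    · exact ⟨u, c, by simpa [List.concat_eq_append] using h⟩
  have hc : c = w[i] := by
    have hui : u.length = i := by rw [huc] at htlen; simp at htlen; omega
    have h1 : t[i]? = w[i]? := by rw [ht]; exact List.getElem?_take_of_lt (by omega)
    have h2 : t[i]? = some c := by rw [huc, ← hui]; exact List.getElem?_concat_length
    have h3 : w[i]? = some w[i] := List.getElem?_eq_getElem hi
    rw [h1, h3] at h2
    exact (Option.some.inj h2).symm
  have hfuel : w.length + 1 = s.length + (t.length + 1) := by omega
  rw [hfuel]
  conv_lhs => rw [hw]
  rw [loop_skip s hsnv t (t.length + 1)]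
  have hst : s ++ t = (s ++ u) ++ [c] := by rw [huc, List.append_assoc]
  rw [hst]
  exact loop_stop (s ++ u) c t.length (by rw [hc]; exact hv)

theorem alt_eq (w : List Char) (i : Nat) (hi : i < w.length)
    (hv : w[i] ∈ pvVowels)
    (hafter : ∀ j, i < j → (hj : j < w.length) → w[j] ∉ pvVowels) :
    reverseConstAltGo w w.length = w.drop (i + 1) ++ w.take (i + 1) := by
  have : w.length = i + 1 + (w.length - (i + 1)) := by omega
  rw [this, alt_skip w i _ (by omega) hafter, alt_stop w i hi hv]

-- ===== VERDICT (by name: the statement is the Claim_ definition above) =====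
theorem reverseConst_spec : Claim_equal_reverseConst := by
  intro word _ hpre
  unfold Spec_reverseConst reverseConst reverseConst_alt
  rcases hpre with hnil | hvow
  · rw [hnil]; rfl
  · obtain ⟨c, hc, hcv⟩ := List.any_eq_true.mp hvow
    obtain ⟨i, hi, hv, hafter⟩ := exists_last_vowel word.toList ⟨c, hc, by simpa using hcv⟩
    rw [both_eq word.toList i hi hv hafter, alt_eq word.toList i hi hv hafter]
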